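-- pv_equiv track=rewrite | github.com/belovmd/it-academy-python-spring | Homework2/CodeWars.py | parse
-- ===== SOURCE A (Python) =====
-- def parse(data):
--     out_list = [0]
--     index_list = 0
--     n_str = 0
--     for letter in data:
--         if letter == 'i':
--             out_list[index_list] += 1
--         elif letter == 'd':
--             out_list[index_list] -= 1
--         elif letter == 's':
--             out_list[index_list] = out_list[index_list] ** 2
--         elif letter == 'o':
--             if n_str < len(data) - 1:
--                 out_list.append(out_list[index_list])
--             index_list += 1
--         n_str += 1
--     return out_list
-- ===== SOURCE B (Python) =====
-- def parse(data):
--     # Staged: split on 'o' into segments, scan segment-by-segment collecting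
--     # the running value after each segment; a trailing 'o' contributes no cell.
--     vals = []
--     v = 0
--     for seg in data.split('o'):
--         for ch in seg:
--             if ch == 'i':
--                 v += 1
--             elif ch == 'd':
--                 v -= 1
--             elif ch == 's':
--                 v = v * v
--         vals.append(v)
--     return vals[:-1] if data.endswith('o') else vals
-- ===== Notes on version B (the rewrite author's own statement) =====
-- stated objective: alternative
-- what changed: B is staged: it splits the string on the output-separator character into segments, scans the segments collecting the running value after each one, and drops the last cell when the string ends with a separator, instead of A's single character loop mutating one list through an index pointer.
import Mathlib
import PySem

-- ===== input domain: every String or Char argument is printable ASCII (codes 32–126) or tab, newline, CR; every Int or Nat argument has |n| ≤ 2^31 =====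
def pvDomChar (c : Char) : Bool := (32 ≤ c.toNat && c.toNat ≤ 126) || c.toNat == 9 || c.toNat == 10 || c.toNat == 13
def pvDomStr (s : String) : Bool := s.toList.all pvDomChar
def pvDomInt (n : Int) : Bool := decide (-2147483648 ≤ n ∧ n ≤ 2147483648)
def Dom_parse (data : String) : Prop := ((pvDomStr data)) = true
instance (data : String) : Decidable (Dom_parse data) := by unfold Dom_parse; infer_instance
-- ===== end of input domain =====

-- B replaces A's single character loop mutating one list through an index pointer by a
-- staged computation: split on 'o', scan the segments, drop the last cell on a trailing 'o'.

-- ===== PORT A =====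
-- A's loop state: (out_list, index_list, n_str); out_list[index_list] read via getD,
-- written via List.set (the index is always in range on reachable states).
def parseStepA (L : Nat) (st : List Int × Nat × Nat) (letter : Char) : List Int × Nat × Nat :=
  let out := st.1
  let idx := st.2.1
  let n := st.2.2
  if letter = 'i' then (out.set idx (out.getD idx 0 + 1), idx, n + 1)
  else if letter = 'd' then (out.set idx (out.getD idx 0 - 1), idx, n + 1)
  else if letter = 's' then (out.set idx (out.getD idx 0 ^ 2), idx, n + 1)
  else if letter = 'o' then
    ((if n < L - 1 then out ++ [out.getD idx 0] else out), idx + 1, n + 1)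
  else (out, idx, n + 1)

def parse (data : String) : List Int :=
  (data.toList.foldl (parseStepA data.toList.length) ([0], 0, 0)).1

-- ===== PORT B =====
-- one command applied to the running value (the inner for-loop's body)
def bStep (v : Int) (ch : Char) : Int :=
  if ch = 'i' then v + 1
  else if ch = 'd' then v - 1
  else if ch = 's' then v * v
  else v

-- the outer for-loop's body: run one segment, append the value reached
def bSeg (p : Int × List Int) (seg : String) : Int × List Int :=
  let v := seg.toList.foldl bStep p.1
  (v, p.2 ++ [v])

def parse_alt (data : String) : List Int :=
  let segs : List String := (PySem.Str.split? data "o").getD []   -- data.split('o'); sep ≠ "" so never none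
  let st := segs.foldl bSeg (0, [])
  if PySem.Str.endswith data "o" then PySem.List.slice st.2 none (some (-1)) else st.2

-- ===== PRECONDITION & SPEC =====
def Spec_parse (data : String) (out : List Int) : Prop := out = parse_alt data
instance (data : String) (out : List Int) : Decidable (Spec_parse data out) := by unfold Spec_parse; infer_instance

-- ===== CLAIM (what is proved, stated in full; the proofs are below) =====
def Claim_equal_parse : Prop := ∀ (data : String), Dom_parse data → Spec_parse data (parse data)

-- ===== LEMMAS AND PROOFS =====

-- the common specification: output for the remaining characters, given the running value
def gSpec : List Char → Int → List Int
  | [], cur => [cur]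
  | c :: l, cur =>
    if c = 'i' then gSpec l (cur + 1)
    else if c = 'd' then gSpec l (cur - 1)
    else if c = 's' then gSpec l (cur * cur)
    else if c = 'o' then (if l = [] then [cur] else cur :: gSpec l cur)
    else gSpec l cur

theorem snoc_getD (res : List Int) (c d : Int) : (res ++ [c]).getD res.length d = c := by
  simp [List.getD]

theorem snoc_set (res : List Int) (c v : Int) : (res ++ [c]).set res.length v = res ++ [v] := by
  induction res with
  | nil => simp
  | cons a t ih => simp [ih]

-- A-side invariant: A's out_list is res ++ [cur] with index res.length.
theorem parseA_key (L : Nat) : ∀ (l : List Char) (n : Nat) (cur : Int) (res : List Int),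
    n + l.length = L →
    (l.foldl (parseStepA L) (res ++ [cur], res.length, n)).1 = res ++ gSpec l cur := by
  intro l
  induction l with
  | nil => intro n cur res _; simp [gSpec]
  | cons c l ih =>
    intro n cur res hL
    simp only [List.length_cons] at hL
    rw [List.foldl_cons]
    by_cases hi : c = 'i'
    · have eA : parseStepA L (res ++ [cur], res.length, n) c
          = (res ++ [cur + 1], res.length, n + 1) := by
        simp [parseStepA, hi, snoc_set]
      rw [eA, ih (n + 1) (cur + 1) res (by omega)]; simp [gSpec, hi]
    · by_cases hd : c = 'd'
      · have eA : parseStepA L (res ++ [cur], res.length, n) c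
            = (res ++ [cur - 1], res.length, n + 1) := by
          simp [parseStepA, hi, hd, snoc_getD, snoc_set]
        rw [eA, ih (n + 1) (cur - 1) res (by omega)]; simp [gSpec, hi, hd]
      · by_cases hs : c = 's'
        · have eA : parseStepA L (res ++ [cur], res.length, n) c
              = (res ++ [cur * cur], res.length, n + 1) := by
            simp [parseStepA, hi, hd, hs, snoc_getD, snoc_set, sq]
          rw [eA, ih (n + 1) (cur * cur) res (by omega)]; simp [gSpec, hi, hd, hs]
        · by_cases ho : c = 'o'
          · by_cases hl0 : l = []
            · subst hl0
              simp only [List.length_nil] at hL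
              have hlt : ¬ n < L - 1 := by omega
              have eA : parseStepA L (res ++ [cur], res.length, n) c
                  = (res ++ [cur], res.length + 1, n + 1) := by
                simp [parseStepA, hi, hd, hs, ho, hlt]
              rw [eA]; simp [gSpec, hi, hd, hs, ho]
            · have hlt : n < L - 1 := by
                have : l.length ≠ 0 := by simpa using (List.length_eq_zero_iff.not.mpr hl0)
                omega
              have eA : parseStepA L (res ++ [cur], res.length, n) c
                  = ((res ++ [cur]) ++ [cur], (res ++ [cur]).length, n + 1) := by
                simp [parseStepA, hi, hd, hs, ho, hlt, snoc_getD]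
              rw [eA, ih (n + 1) cur (res ++ [cur]) (by omega)]
              simp [gSpec, hi, hd, hs, ho, hl0]
          · have eA : parseStepA L (res ++ [cur], res.length, n) c
                = (res ++ [cur], res.length, n + 1) := by
              simp [parseStepA, hi, hd, hs, ho]
            rw [eA, ih (n + 1) cur res (by omega)]; simp [gSpec, hi, hd, hs, ho]

-- simple structural splitter (front-building) used to characterise PySem's fuelled splitOn
def mySplit : List Char → List (List Char)
  | [] => [[]]
  | c :: l => if c = 'o' then [] :: mySplit l else (mySplit l).modifyHead (c :: ·)

theorem mySplit_ne_nil (l : List Char) : mySplit l ≠ [] := by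
  cases l with
  | nil => simp [mySplit]
  | cons c l =>
    simp only [mySplit]
    split
    · simp
    · cases h : mySplit l with
      | nil => exact absurd h (mySplit_ne_nil l)
      | cons a t => simp [h]

-- characterisation of the fuelled go of PySem.Chars.splitOn for the one-char separator 'o'
theorem splitOn_go_key : ∀ (fuel : Nat) (l cur : List Char) (acc : List (List Char)),
    l.length < fuel →
    PySem.Chars.splitOn.go ['o'] fuel l cur acc
      = acc.reverse ++ ((mySplit l).modifyHead (cur.reverse ++ ·)) := by
  intro fuel
  induction fuel with
  | zero => intro l cur acc h; omega
  | succ n ih =>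
    intro l cur acc h
    cases l with
    | nil => simp [PySem.Chars.splitOn.go, mySplit]
    | cons c rest =>
      simp only [List.length_cons] at h
      by_cases hc : c = 'o'
      · subst hc
        have : PySem.Chars.splitOn.go ['o'] (n+1) ('o' :: rest) cur acc
            = PySem.Chars.splitOn.go ['o'] n rest [] (cur.reverse :: acc) := by
          simp [PySem.Chars.splitOn.go]
        rw [this, ih rest [] (cur.reverse :: acc) (by omega)]
        cases hms : mySplit rest with
        | nil => exact absurd hms (mySplit_ne_nil rest)
        | cons a t => simp [mySplit, hms]
      · have : PySem.Chars.splitOn.go ['o'] (n+1) (c :: rest) cur acc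
            = PySem.Chars.splitOn.go ['o'] n rest (c :: cur) acc := by
          have hpre : ['o'].isPrefixOf (c :: rest) = false := by
            simp [List.isPrefixOf]; intro h'; exact hc h'.symm
          simp [PySem.Chars.splitOn.go, hpre]
        rw [this, ih rest (c :: cur) acc (by omega)]
        cases hms : mySplit rest with
        | nil => exact absurd hms (mySplit_ne_nil rest)
        | cons a t => simp [mySplit, hc, hms]

theorem splitOn_eq_mySplit (l : List Char) :
    PySem.Chars.splitOn l ['o'] = mySplit l := by
  have := splitOn_go_key (l.length + 1) l [] [] (by omega)
  cases hms : mySplit l with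
  | nil => exact absurd hms (mySplit_ne_nil l)
  | cons a t =>
    rw [hms] at this
    simpa [PySem.Chars.splitOn, hms] using this

theorem gSpec_skip (c : Char) (l : List Char) (cur : Int) (hc : c ≠ 'o') :
    gSpec (c :: l) cur = gSpec l (bStep cur c) := by
  by_cases hi : c = 'i' <;> by_cases hd : c = 'd' <;> by_cases hs : c = 's' <;>
    simp_all [gSpec, bStep]

-- B-side key lemma: the staged segment scan computes gSpec.
theorem parseB_key : ∀ (l : List Char) (cur : Int) (vals : List Int),
    (if l.getLast? = some 'o'
       then ((mySplit l).foldl (fun p seg => (seg.foldl bStep p.1, p.2 ++ [seg.foldl bStep p.1])) (cur, vals)).2.dropLast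
       else ((mySplit l).foldl (fun p seg => (seg.foldl bStep p.1, p.2 ++ [seg.foldl bStep p.1])) (cur, vals)).2)
      = vals ++ gSpec l cur := by
  intro l
  induction l with
  | nil => intro cur vals; simp [mySplit, gSpec]
  | cons c l ih =>
    intro cur vals
    by_cases hc : c = 'o'
    · subst hc
      cases hl0 : l with
      | nil => simp [mySplit, gSpec]
      | cons c' l' =>
        rw [← hl0]
        have hsplit : mySplit ('o' :: l) = [] :: mySplit l := by simp [mySplit]
        have hlast : ('o' :: l).getLast? = l.getLast? := by rw [hl0]; simp
        rw [hsplit, hlast]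
        simp only [List.foldl_cons, List.foldl_nil]
        have := ih cur (vals ++ [cur])
        simp only [List.append_assoc] at this ⊢
        rw [this]
        simp [gSpec, hl0]
    · -- first segment of mySplit (c :: l) is c :: head of mySplit l
      have hlast : (c :: l).getLast? = some 'o' ↔ l.getLast? = some 'o' := by
        cases l with
        | nil => simp; intro h; exact hc h
        | cons a t => simp
      cases hms : mySplit l with
      | nil => exact absurd hms (mySplit_ne_nil l)
      | cons a t =>
        have hstep : mySplit (c :: l) = (c :: a) :: t := by simp [mySplit, hc, hms]
        have := ih (bStep cur c) vals
        rw [hms] at this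
        rw [gSpec_skip c l cur hc, ← this, hstep]
        by_cases hL : l.getLast? = some 'o' <;>
          simp [List.foldl_cons, hlast, hL]

theorem endswith_o (l : List Char) :
    PySem.Chars.endswith l ['o'] = decide (l.getLast? = some 'o') := by
  by_cases h : l.getLast? = some 'o'
  · have hs : ['o'] <:+ l := by
      rcases List.getLast?_eq_some_iff.mp h with ⟨ys, hys⟩
      exact ⟨ys, by simpa using hys.symm⟩
    simp [PySem.Chars.endswith, List.isSuffixOf_iff_suffix, hs, h]
  · have hs : ¬ (['o'] <:+ l) := by
      intro hsuf
      rcases hsuf with ⟨ys, hys⟩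
      exact h (by rw [← hys]; simp)
    simp only [h, decide_false]
    cases hb : PySem.Chars.endswith l ['o'] with
    | false => rfl
    | true =>
      exact absurd (List.isSuffixOf_iff_suffix.mp hb) hs

theorem parse_alt_eq_gSpec (data : String) : parse_alt data = gSpec data.toList 0 := by
  have hsplit : (PySem.Str.split? data "o").getD []
      = (mySplit data.toList).map String.ofList := by
    simp [PySem.Str.split?, PySem.Chars.split?, splitOn_eq_mySplit]
  have hfold : ∀ (segs : List (List Char)) (p : Int × List Int),
      (segs.map String.ofList).foldl bSeg p
        = segs.foldl (fun p seg => (seg.foldl bStep p.1, p.2 ++ [seg.foldl bStep p.1])) p := by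
    intro segs
    induction segs with
    | nil => intro p; simp
    | cons t ts ih => intro p; simp [bSeg, ih]
  have hend : PySem.Str.endswith data "o" = decide (data.toList.getLast? = some 'o') := by
    simpa [PySem.Str.endswith] using endswith_o data.toList
  have hkey := parseB_key data.toList 0 []
  unfold parse_alt
  simp only [hsplit, hfold, hend]
  by_cases hL : data.toList.getLast? = some 'o'
  · simp only [hL, decide_true, if_true, PySem.List.slice_to_neg_one]
    simpa [hL] using hkey
  · simp only [hL, decide_false, if_false]
    simpa [hL] using hkey

-- ===== VERDICT (by name: the statement is the Claim_ definition above) =====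
theorem parse_spec : Claim_equal_parse := by
  intro data _
  unfold Spec_parse parse
  rw [parse_alt_eq_gSpec]
  simpa using parseA_key data.toList.length data.toList 0 0 [] (by simp)
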